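-- pv_equiv track=rewrite | github.com/alumnos-ingcom/TP5-Marsiocons | tp5ej9.py | factoriales
-- ===== SOURCE A (Python) =====
-- def factoriales(entrada):
--
--     numero_lista = str(entrada)
--     nueva_lista = list()
--
--     for i in numero_lista:
--         numero = int(i)
--         resultado = 1
--         lista_factoriales = list()
--
--         for j in range(1, numero+1):
--             lista_factoriales.append(j)
--         for k in lista_factoriales:
--             resultado = resultado * k
--         nueva_lista.append(resultado)
--     return nueva_lista
-- ===== SOURCE B (Python) =====
-- _FACT = [1, 1, 2, 6, 24, 120, 720, 5040, 40320, 362880]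
--
-- def factoriales(entrada):
--     return [_FACT[int(c)] for c in str(entrada)]
-- ===== Notes on version B (the rewrite author's own statement) =====
-- stated objective: simpler
-- what changed: Replaces A's two inner loops (building range(1,d+1) then multiplying it out for every digit) with a single precomputed factorial table indexed once per digit of str(entrada).
import Mathlib
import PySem

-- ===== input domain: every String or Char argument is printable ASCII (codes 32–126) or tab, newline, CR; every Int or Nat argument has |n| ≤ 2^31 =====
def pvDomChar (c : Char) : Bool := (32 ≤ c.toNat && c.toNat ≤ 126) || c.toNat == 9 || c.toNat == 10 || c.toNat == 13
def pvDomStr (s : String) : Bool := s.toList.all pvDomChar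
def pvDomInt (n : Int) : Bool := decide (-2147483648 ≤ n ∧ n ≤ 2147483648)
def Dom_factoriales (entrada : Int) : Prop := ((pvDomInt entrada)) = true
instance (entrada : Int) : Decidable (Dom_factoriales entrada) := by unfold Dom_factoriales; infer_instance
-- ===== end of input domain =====

-- B replaces A's per-digit range-building and running-product loops with a precomputed
-- factorial table indexed once per digit (objective: simpler).

-- ===== PORT A =====
def factoriales (entrada : Int) : List Int :=
  -- for i in str(entrada): numero = int(i); build range(1, numero+1); multiply it out; append
  (PySem.Int.toChars entrada).foldl
    (fun nueva_lista c =>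
      -- int(i): exact on digit characters; Pre_ (0 ≤ entrada) guarantees every character is a digit
      let numero : Int := (c.toNat : Int) - 48
      let lista_factoriales := PySem.List.pyRange 1 (numero + 1) 1
      let resultado := lista_factoriales.foldl (fun r k => r * k) 1
      nueva_lista ++ [resultado])
    []

-- ===== PORT B =====
def pvFactTable : List Int := [1, 1, 2, 6, 24, 120, 720, 5040, 40320, 362880]

def factoriales_alt (entrada : Int) : List Int :=
  -- [_FACT[int(c)] for c in str(entrada)]; int(c) exact on digit characters (Pre_), index in range 0..9
  (PySem.Int.toChars entrada).map
    (fun c => (PySem.List.pyGet? pvFactTable ((c.toNat : Int) - 48)).getD 0)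

-- ===== PRECONDITION & SPEC =====
-- Pre_: A raises ValueError (int('-')) on negative entrada; B raises identically there.
def Pre_factoriales (entrada : Int) : Prop := 0 ≤ entrada
instance (entrada : Int) : Decidable (Pre_factoriales entrada) := by unfold Pre_factoriales; infer_instance

def pvWitness_factoriales : Int := 1205

def Spec_factoriales (entrada : Int) (out : List Int) : Prop := out = factoriales_alt entrada
instance (entrada : Int) (out : List Int) : Decidable (Spec_factoriales entrada out) := by unfold Spec_factoriales; infer_instance

-- ===== CLAIM (what is proved, stated in full; the proofs are below) =====
def Claim_equal_factoriales : Prop := ∀ (entrada : Int), Dom_factoriales entrada → Pre_factoriales entrada → Spec_factoriales entrada (factoriales entrada)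

-- ===== LEMMAS AND PROOFS =====

-- every character produced by Nat.toDigitsCore (on top of ds) is a digitChar of some d < 10
theorem mem_toDigitsCore (fuel n : Nat) (ds : List Char) (c : Char)
    (h : c ∈ Nat.toDigitsCore 10 fuel n ds) :
    (∃ d, d < 10 ∧ c = Nat.digitChar d) ∨ c ∈ ds := by
  induction fuel generalizing n ds with
  | zero => simp [Nat.toDigitsCore] at h; exact Or.inr h
  | succ fuel ih =>
    simp only [Nat.toDigitsCore] at h
    split at h
    · rcases List.mem_cons.1 h with h' | h'
      · exact Or.inl ⟨n % 10, Nat.mod_lt _ (by omega), h'⟩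
      · exact Or.inr h'
    · rcases ih _ _ h with h' | h'
      · exact Or.inl h'
      · rcases List.mem_cons.1 h' with h'' | h''
        · exact Or.inl ⟨n % 10, Nat.mod_lt _ (by omega), h''⟩
        · exact Or.inr h''

-- on a digit character, A's running product over range(1, d+1) equals B's table lookup
theorem step_eq (d : Nat) (hd : d < 10) :
    (PySem.List.pyRange 1 (((Nat.digitChar d).toNat : Int) - 48 + 1) 1).foldl (fun r k => r * k) 1
      = (PySem.List.pyGet? pvFactTable (((Nat.digitChar d).toNat : Int) - 48)).getD 0 := by
  interval_cases d <;> decide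

-- ===== VERDICT (by name: the statement is the Claim_ definition above) =====
theorem factoriales_spec : Claim_equal_factoriales := by
  intro entrada _ hpre
  unfold Spec_factoriales factoriales factoriales_alt
  rw [PySem.List.foldl_append_singleton_eq_map]
  refine List.map_congr_left (fun c hc => ?_)
  have hchars : PySem.Int.toChars entrada = Nat.toDigits 10 entrada.toNat := by
    simp [PySem.Int.toChars, not_lt.2 hpre]
  rw [hchars] at hc
  rcases mem_toDigitsCore _ _ _ _ hc with ⟨d, hd, rfl⟩ | h
  · exact step_eq d hd
  · simp at h
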